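-- pv_equiv track=rewrite | github.com/Lala-chick/problem-solving | 0629/에라토스테네스의체.py | eratos
-- ===== SOURCE A (Python) =====
-- def eratos(N, K):
--
--     visited = [0] * (N+1)
--
--     cnt = 0
--
--     for i in range(2, N+1):
--         for j in range(i, N+1, i):
--             if visited[j] == 0:
--                 visited[j] = 1
--                 cnt += 1
--                 if cnt == K:
--                     return j
-- ===== SOURCE B (Python) =====
-- def eratos(N, K):
--     # Bucket strategy: a number m is crossed off exactly when the outer index i
--     # reaches its smallest prime factor, and multiples of each prime are crossed
--     # in increasing order.  So the crossing order is 2..N grouped by smallest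
--     # prime factor.  Compute an spf table with a p*p sieve, bucket 2..N by spf,
--     # flatten, and index.
--     if K < 1 or K > N - 1:
--         return None
--     spf = list(range(N + 1))
--     for i in range(2, N + 1):
--         if spf[i] == i:
--             for j in range(i * i, N + 1, i):
--                 if spf[j] == j:
--                     spf[j] = i
--     buckets = [[] for _ in range(N + 1)]
--     for m in range(2, N + 1):
--         buckets[spf[m]].append(m)
--     order = [m for b in buckets for m in b]
--     return order[K - 1]
-- ===== Notes on version B (the rewrite author's own statement) =====
-- stated objective: alternative
-- what changed: Replaces A's crossing simulation (nested loops over every i with a visited array and a running counter, returning mid-loop) by a closed characterisation: compute a smallest-prime-factor table with a p*p sieve, bucket 2..N by spf (the crossing order is exactly 2..N grouped by spf, increasing within a group), flatten and index the K-th element directly.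
import Mathlib
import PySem

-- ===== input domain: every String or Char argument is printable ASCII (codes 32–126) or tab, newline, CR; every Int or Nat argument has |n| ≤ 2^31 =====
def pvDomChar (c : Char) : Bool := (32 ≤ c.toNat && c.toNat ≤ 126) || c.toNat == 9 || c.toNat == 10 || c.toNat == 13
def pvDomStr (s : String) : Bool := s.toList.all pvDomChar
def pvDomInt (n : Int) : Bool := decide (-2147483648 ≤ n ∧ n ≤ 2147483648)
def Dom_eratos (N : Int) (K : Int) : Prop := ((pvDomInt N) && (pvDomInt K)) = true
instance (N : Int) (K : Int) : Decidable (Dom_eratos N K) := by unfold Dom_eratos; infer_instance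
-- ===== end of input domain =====

-- B differs from A by a bucket strategy: spf table by a p*p sieve, group 2..N by smallest
-- prime factor, flatten and index; an alternative decomposition of the same crossing order.

-- ===== PORT A =====
-- Python list subscript / item assignment, on a dynamic array as in CPython; exact for the
-- nonnegative in-range indices these loops use (all reads/writes here have 0 ≤ index ≤ N).
def pyArrGet {α : Type} (v : Array α) (i : Int) (d : α) : α := v.getD i.toNat d
def pyArrSet {α : Type} (v : Array α) (i : Int) (x : α) : Array α := v.setIfInBounds i.toNat x

-- inner loop 'for j in range(i, N+1, i)' with early return; state (visited, cnt)
def eratosInnerA (K : Int) : List Int → Array Int → Int → (Array Int × Int) ⊕ Int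
  | [], v, cnt => .inl (v, cnt)
  | j :: js, v, cnt =>
    if pyArrGet v j 0 = 0 then
      let v' := pyArrSet v j 1
      if cnt + 1 = K then .inr j else eratosInnerA K js v' (cnt + 1)
    else eratosInnerA K js v cnt

-- outer loop 'for i in range(2, N+1)'; falling off the end returns None
def eratosOuterA (N K : Int) : List Int → Array Int → Int → Option Int
  | [], _, _ => none
  | i :: is, v, cnt =>
    match eratosInnerA K (PySem.List.pyRange i (N + 1) i) v cnt with
    | .inr j => some j
    | .inl (v', cnt') => eratosOuterA N K is v' cnt'

def eratos (N : Int) (K : Int) : Option Int :=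
  eratosOuterA N K (PySem.List.pyRange 2 (N + 1) 1) (Array.replicate (N + 1).toNat 0) 0

-- ===== PORT B =====
def eratos_alt (N : Int) (K : Int) : Option Int :=
  if K < 1 ∨ N - 1 < K then none
  else
    let spf := (PySem.List.pyRange 2 (N + 1) 1).foldl
      (fun spf i =>
        if pyArrGet spf i 0 = i then
          (PySem.List.pyRange (i * i) (N + 1) i).foldl
            (fun s j => if pyArrGet s j 0 = j then pyArrSet s j i else s) spf
        else spf)
      (PySem.List.pyRange 0 (N + 1) 1).toArray
    let buckets := (PySem.List.pyRange 2 (N + 1) 1).foldl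
      (fun bs m => pyArrSet bs (pyArrGet spf m 0) (pyArrGet bs (pyArrGet spf m 0) [] ++ [m]))
      (Array.replicate (N + 1).toNat ([] : List Int))
    let order := buckets.toList.flatten
    PySem.List.pyGet? order (K - 1)

-- ===== PRECONDITION & SPEC =====
def Spec_eratos (N : Int) (K : Int) (out : Option Int) : Prop := out = eratos_alt N K
instance (N : Int) (K : Int) (out : Option Int) : Decidable (Spec_eratos N K out) := by unfold Spec_eratos; infer_instance

-- ===== CLAIM (what is proved, stated in full; the proofs are below) =====
def Claim_equal_eratos : Prop := ∀ (N : Int) (K : Int), Dom_eratos N K → Spec_eratos N K (eratos N K)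

-- ===== LEMMAS AND PROOFS =====

-- smallest prime factor, as an Int
def spfI (m : Int) : Int := (m.natAbs.minFac : Int)

-- the numbers 2..N whose smallest prime factor is p, in increasing order
def Sp (N p : Int) : List Int :=
  (PySem.List.pyRange 2 (N + 1) 1).filter (fun m => decide (spfI m = p))

-- the canonical crossing order: 2..N grouped by smallest prime factor
def corder (N : Int) : List Int := ((PySem.List.pyRange 2 (N + 1) 1).map (fun p => Sp N p)).flatten

-- abstract scanner: walk a list counting; return the element where the count hits K
def scanA (K : Int) : List Int → Int → Int ⊕ Int
  | [], cnt => .inl cnt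
  | x :: t, cnt => if cnt + 1 = K then .inr x else scanA K t (cnt + 1)

def toOptA : Int ⊕ Int → Option Int
  | .inl _ => none
  | .inr j => some j

def markAll (v : Array Int) (S : List Int) : Array Int :=
  S.foldl (fun v j => pyArrSet v j 1) v

-- bridge lemmas for the array subscript helpers
theorem pyArrSet_size {α : Type} (v : Array α) (i : Int) (x : α) :
    (pyArrSet v i x).size = v.size := Array.size_setIfInBounds

theorem pyArrGet_set {α : Type} (v : Array α) (i m : Int) (x d : α) (h : i.toNat < v.size) :
    pyArrGet (pyArrSet v i x) m d = if m.toNat = i.toNat then x else pyArrGet v m d := by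
  unfold pyArrGet pyArrSet
  rw [Array.getD_eq_getD_getElem?, Array.getD_eq_getD_getElem?, Array.getElem?_setIfInBounds]
  by_cases he : m.toNat = i.toNat
  · rw [if_pos he, if_pos he.symm, if_pos h]
    rfl
  · rw [if_neg he, if_neg (fun hh => he hh.symm)]

theorem pyArrGet_replicate {α : Type} (n : Nat) (x d : α) (m : Int)
    (h0 : 0 ≤ m) (h : m < (n : Int)) : pyArrGet (Array.replicate n x) m d = x := by
  unfold pyArrGet
  rw [Array.getD_eq_getD_getElem?, Array.getElem?_replicate, if_pos (by omega)]
  rfl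

theorem pyArrGet_eq_getElem {α : Type} (v : Array α) (k : Nat) (d : α) (h : k < v.size) :
    pyArrGet v (k : Int) d = v[k] := by
  unfold pyArrGet
  rw [Array.getD_eq_getD_getElem?, Int.toNat_natCast, Array.getElem?_eq_getElem h]
  rfl

theorem pyArrGet_toArray {α : Type} (xs : List α) (m : Int) (d : α) :
    pyArrGet xs.toArray m d = xs.getD m.toNat d := by
  unfold pyArrGet
  rw [Array.getD_eq_getD_getElem?, List.getElem?_toArray, List.getD_eq_getElem?_getD]

-- ---- number theory on spfI ----

theorem spfI_two_le {m : Int} (h : 2 ≤ m) : 2 ≤ spfI m := by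
  unfold spfI
  have h1 : m.natAbs ≠ 1 := by omega
  have := (Nat.minFac_prime h1).two_le
  omega

theorem spfI_le_self {m : Int} (h : 2 ≤ m) : spfI m ≤ m := by
  unfold spfI
  have h0 : 0 < m.natAbs := by omega
  have := Nat.minFac_le h0
  omega

theorem spfI_dvd {m : Int} (h : 0 ≤ m) : spfI m ∣ m := by
  unfold spfI
  have h1 : (m.natAbs.minFac : Int) ∣ (m.natAbs : Int) := Int.natCast_dvd_natCast.mpr (Nat.minFac_dvd _)
  rwa [Int.natAbs_of_nonneg h] at h1

theorem spfI_le_of_dvd {d m : Int} (hd : 2 ≤ d) (hdvd : d ∣ m) : spfI m ≤ d := by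
  unfold spfI
  have hd' : 2 ≤ d.natAbs := by omega
  have hdvd' : d.natAbs ∣ m.natAbs := Int.natAbs_dvd_natAbs.mpr hdvd
  have := Nat.minFac_le_of_dvd hd' hdvd'
  omega

theorem spfI_sq_le {m : Int} (h : 2 ≤ m) (hlt : spfI m < m) : spfI m * spfI m ≤ m := by
  unfold spfI at *
  set n := m.natAbs with hn
  have hn2 : 2 ≤ n := by omega
  have hdvd : n.minFac ∣ n := Nat.minFac_dvd n
  obtain ⟨q, hq⟩ := hdvd
  have hq0 : q ≠ 0 := by rintro rfl; omega
  have hq1 : q ≠ 1 := by rintro rfl; omega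
  have hqd : q ∣ n := by
    have : q ∣ n.minFac * q := ⟨n.minFac, Nat.mul_comm _ _⟩
    rwa [← hq] at this
  have hle : n.minFac ≤ q := Nat.minFac_le_of_dvd (by omega) hqd
  have : n.minFac * n.minFac ≤ n.minFac * q := Nat.mul_le_mul_left _ hle
  rw [← hq] at this
  omega

theorem spfI_eq_self_of_sq_gt {m : Int} (h : 2 ≤ m) (hgt : m < spfI m * spfI m) : spfI m = m := by
  have hle := spfI_le_self h
  rcases lt_or_eq_of_le hle with hlt | he
  · exact absurd (spfI_sq_le h hlt) (by omega)
  · exact he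

theorem spfI_spfI {m : Int} (h : 2 ≤ m) : spfI (spfI m) = spfI m := by
  unfold spfI
  have h1 : m.natAbs ≠ 1 := by omega
  have hp : (m.natAbs.minFac).Prime := Nat.minFac_prime h1
  rw [Int.natAbs_natCast, Nat.Prime.minFac_eq hp]

-- ---- generic list facts ----

theorem nodup_pyRange_pos (a b : Int) {s : Int} (hs : 0 < s) : (PySem.List.pyRange a b s).Nodup := by
  rw [PySem.List.pyRange_of_pos _ _ hs]
  refine List.Nodup.map ?_ List.nodup_range
  intro x y hxy
  simp only at hxy
  have : s * (x:Int) = s * y := by omega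
  have := mul_left_cancel₀ (by omega : (s:Int) ≠ 0) this
  exact_mod_cast this

theorem pairwise_lt_pyRange_pos (a b : Int) {s : Int} (hs : 0 < s) :
    (PySem.List.pyRange a b s).Pairwise (· < ·) := by
  rw [PySem.List.pyRange_of_pos _ _ hs]
  refine List.Pairwise.map _ ?_ (List.pairwise_lt_range)
  intro x y hxy
  have hxy' : (x:Int) < y := by exact_mod_cast hxy
  show a + s * (x:Int) < a + s * y
  nlinarith

theorem eq_of_mem_iff_pairwise_lt {l₁ l₂ : List Int}
    (h₁ : l₁.Pairwise (· < ·)) (h₂ : l₂.Pairwise (· < ·))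
    (hmem : ∀ x, x ∈ l₁ ↔ x ∈ l₂) : l₁ = l₂ := by
  have hn1 : l₁.Nodup := h₁.imp (fun h => ne_of_lt h)
  have hn2 : l₂.Nodup := h₂.imp (fun h => ne_of_lt h)
  have hperm : l₁.Perm l₂ := (List.perm_ext_iff_of_nodup hn1 hn2).mpr hmem
  exact List.Perm.eq_of_pairwise (fun a b _ _ hab hba => by omega) h₁ h₂ hperm

theorem foldl_range_inv {σ : Type} (f : σ → Int → σ) (P : Int → σ → Prop) (b : Int)
    (hstep : ∀ t x, t < b → P t x → P (t + 1) (f x t)) :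
    ∀ (a : Int) (s : σ), a ≤ b → P a s → P b ((PySem.List.pyRange a b 1).foldl f s) := by
  intro a s hab hP
  induction hn : (b - a).toNat generalizing a s with
  | zero =>
    have hba : b ≤ a := by omega
    have : a = b := le_antisymm hab hba
    subst this
    rw [PySem.List.pyRange_one_eq_nil le_rfl]
    simpa using hP
  | succ n ih =>
    have hlt : a < b := by omega
    rw [PySem.List.pyRange_one_cons hlt]
    simp only [List.foldl_cons]
    exact ih (a + 1) (f s a) (by omega) (hstep a s hlt hP) (by omega)

-- ---- scanner facts ----

theorem scanA_append (K : Int) (L₁ L₂ : List Int) (cnt : Int) :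
    scanA K (L₁ ++ L₂) cnt =
      match scanA K L₁ cnt with
      | .inl c => scanA K L₂ c
      | .inr j => .inr j := by
  induction L₁ generalizing cnt with
  | nil => simp [scanA]
  | cons x t ih =>
    simp only [List.cons_append, scanA]
    by_cases h : cnt + 1 = K
    · simp [h]
    · simp only [if_neg h]
      exact ih (cnt + 1)

theorem scanA_spec (K : Int) : ∀ (L : List Int) (cnt : Int),
    scanA K L cnt =
      if cnt < K ∧ K ≤ cnt + L.length then .inr (L.getD (K - 1 - cnt).toNat 0)
      else .inl (cnt + L.length) := by
  intro L
  induction L with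
  | nil =>
    intro cnt
    simp only [scanA, List.length_nil]
    rw [if_neg (by omega)]
    simp
  | cons x t ih =>
    intro cnt
    simp only [scanA, List.length_cons]
    by_cases h : cnt + 1 = K
    · rw [if_pos h, if_pos (by omega)]
      have : (K - 1 - cnt).toNat = 0 := by omega
      rw [this]
      rfl
    · rw [if_neg h, ih (cnt + 1)]
      by_cases h2 : cnt + 1 < K ∧ K ≤ cnt + 1 + (t.length : Int)
      · rw [if_pos h2, if_pos (by push_cast; omega)]
        have h3 : (K - 1 - cnt).toNat = (K - 1 - (cnt + 1)).toNat + 1 := by omega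
        rw [h3]
        rfl
      · rw [if_neg h2, if_neg (by push_cast at h2 ⊢; omega)]
        congr 1
        push_cast
        ring

-- ---- markAll facts ----

theorem markAll_size (v : Array Int) (S : List Int) : (markAll v S).size = v.size := by
  unfold markAll
  induction S generalizing v with
  | nil => rfl
  | cons j S ih =>
    simp only [List.foldl_cons]
    rw [ih]
    exact pyArrSet_size v j 1

theorem markAll_getD (S : List Int) : ∀ (v : Array Int),
    (∀ j ∈ S, 0 ≤ j ∧ j.toNat < v.size) → ∀ (m : Int), 0 ≤ m →
    pyArrGet (markAll v S) m 0 = if m ∈ S then 1 else pyArrGet v m 0 := by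
  induction S with
  | nil =>
    intro v _ m _
    simp [markAll]
  | cons j S ih =>
    intro v hS m hm
    obtain ⟨hj0, hjlen⟩ := hS j (List.mem_cons_self)
    have hstep : markAll v (j :: S) = markAll (pyArrSet v j 1) S := rfl
    rw [hstep, ih (pyArrSet v j 1)
      (fun x hx => by rw [pyArrSet_size]; exact hS x (List.mem_cons_of_mem _ hx)) m hm]
    have hget : pyArrGet (pyArrSet v j 1) m 0
        = if m.toNat = j.toNat then 1 else pyArrGet v m 0 := pyArrGet_set v j m 1 0 hjlen
    rw [hget]
    by_cases hmS : m ∈ S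
    · simp [hmS]
    · by_cases hmj : m = j
      · subst hmj
        simp [hmS]
      · have : m.toNat ≠ j.toNat := by omega
        simp [hmS, hmj, this]

-- ---- membership in Sp ----

theorem mem_Sp {N p m : Int} : m ∈ Sp N p ↔ 2 ≤ m ∧ m ≤ N ∧ spfI m = p := by
  unfold Sp
  rw [List.mem_filter]
  rw [PySem.List.mem_pyRange_one]
  simp only [decide_eq_true_eq]
  omega

-- Sp as a filtered arithmetic progression (what A's inner loop walks)
theorem Sp_eq_multiples (N t : Int) (h2 : 2 ≤ t) :
    Sp N t = (PySem.List.pyRange t (N + 1) t).filter (fun j => decide (spfI j = t)) := by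
  apply eq_of_mem_iff_pairwise_lt
  · exact (PySem.List.pairwise_lt_pyRange_one 2 (N + 1)).filter _
  · exact (pairwise_lt_pyRange_pos t (N + 1) (by omega)).filter _
  · intro x
    rw [mem_Sp, List.mem_filter, PySem.List.mem_pyRange_iff_of_pos (by omega)]
    simp only [decide_eq_true_eq]
    constructor
    · rintro ⟨h2, hN, hspf⟩
      have hdvd : t ∣ x := hspf ▸ spfI_dvd (by omega)
      have hle : t ≤ x := hspf ▸ spfI_le_self h2
      exact ⟨⟨hle, by omega, dvd_sub hdvd dvd_rfl⟩, hspf⟩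
    · rintro ⟨⟨hle, hlt, _⟩, hspf⟩
      exact ⟨by omega, by omega, hspf⟩

-- ---- A side ----

def InvA (N t : Int) (v : Array Int) : Prop :=
  v.size = (N + 1).toNat ∧
  ∀ j : Int, 0 ≤ j → j ≤ N →
    pyArrGet v j 0 = if 2 ≤ j ∧ spfI j < t then 1 else 0

theorem innerA_spec (K : Int) : ∀ (js : List Int) (v : Array Int) (cnt : Int),
    js.Nodup → (∀ j ∈ js, 0 ≤ j ∧ j.toNat < v.size) →
    eratosInnerA K js v cnt =
      (match scanA K (js.filter (fun j => decide (pyArrGet v j 0 = 0))) cnt with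
       | .inl c => .inl (markAll v (js.filter (fun j => decide (pyArrGet v j 0 = 0))), c)
       | .inr j => .inr j) := by
  intro js
  induction js with
  | nil =>
    intro v cnt _ _
    simp [eratosInnerA, scanA, markAll]
  | cons j js ih =>
    intro v cnt hnd hin
    obtain ⟨hj0, hjlen⟩ := hin j (List.mem_cons_self)
    have hjns : j ∉ js := (List.nodup_cons.mp hnd).1
    simp only [eratosInnerA, List.filter_cons]
    by_cases h : pyArrGet v j 0 = 0
    · rw [if_pos h]
      have hcond : decide (pyArrGet v j 0 = 0) = true := decide_eq_true h
      rw [hcond]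
      rw [if_pos rfl]
      by_cases hk : cnt + 1 = K
      · simp only [scanA, if_pos hk]
      · simp only [scanA, if_neg hk]
        rw [ih (pyArrSet v j 1) (cnt + 1) (List.nodup_cons.mp hnd).2
          (fun x hx => by
            rw [pyArrSet_size]
            exact hin x (List.mem_cons_of_mem _ hx))]
        have hfil : js.filter (fun x => decide (pyArrGet (pyArrSet v j 1) x 0 = 0))
            = js.filter (fun x => decide (pyArrGet v x 0 = 0)) := by
          apply List.filter_congr
          intro x hx
          obtain ⟨hx0, hxlen⟩ := hin x (List.mem_cons_of_mem _ hx)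
          have hxj : x ≠ j := fun he => hjns (he ▸ hx)
          have hxj' : x.toNat ≠ j.toNat := by omega
          rw [pyArrGet_set v j x 1 0 hjlen, if_neg hxj']
        rw [hfil]
        rfl
    · rw [if_neg h]
      have hcond : decide (pyArrGet v j 0 = 0) = false := decide_eq_false h
      rw [hcond]
      rw [if_neg (by simp)]
      exact ih v cnt (List.nodup_cons.mp hnd).2
        (fun x hx => hin x (List.mem_cons_of_mem _ hx))

theorem outerA_spec (N K : Int) : ∀ (n : Nat) (t : Int) (v : Array Int) (cnt : Int),
    (N + 1 - t).toNat = n → 2 ≤ t → t ≤ N + 1 → InvA N t v →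
    eratosOuterA N K (PySem.List.pyRange t (N + 1) 1) v cnt =
      toOptA (scanA K (((PySem.List.pyRange t (N + 1) 1).map (fun p => Sp N p)).flatten) cnt) := by
  intro n
  induction n with
  | zero =>
    intro t v cnt hn h2 hle hInv
    have ht : t = N + 1 := by omega
    subst ht
    rw [PySem.List.pyRange_one_eq_nil le_rfl]
    simp [eratosOuterA, scanA, toOptA]
  | succ n ih =>
    intro t v cnt hn h2 hle hInv
    have hlt : t < N + 1 := by omega
    rw [PySem.List.pyRange_one_cons hlt]
    simp only [eratosOuterA, List.map_cons, List.flatten_cons]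
    have hnd : (PySem.List.pyRange t (N + 1) t).Nodup := nodup_pyRange_pos _ _ (by omega)
    have hin : ∀ j ∈ PySem.List.pyRange t (N + 1) t, 0 ≤ j ∧ j.toNat < v.size := by
      intro j hj
      rw [PySem.List.mem_pyRange_iff_of_pos (by omega)] at hj
      refine ⟨by omega, ?_⟩
      rw [hInv.1]
      omega
    rw [innerA_spec K _ v cnt hnd hin]
    have hfil : (PySem.List.pyRange t (N + 1) t).filter
        (fun j => decide (pyArrGet v j 0 = 0)) = Sp N t := by
      rw [Sp_eq_multiples N t h2]
      apply List.filter_congr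
      intro x hx
      rw [PySem.List.mem_pyRange_iff_of_pos (by omega)] at hx
      obtain ⟨hxt, hxN, hxd⟩ := hx
      have hdvd : t ∣ x := by
        have h' := dvd_add hxd (dvd_refl t)
        simpa using h'
      have hx2 : (2:Int) ≤ x := by omega
      have hsle : spfI x ≤ t := spfI_le_of_dvd h2 hdvd
      rw [hInv.2 x (by omega) (by omega)]
      by_cases hcase : spfI x < t
      · rw [if_pos ⟨hx2, hcase⟩]
        have hne : spfI x ≠ t := by omega
        simp [hne]
      · rw [if_neg (by intro hh; exact hcase hh.2)]
        have heq : spfI x = t := by omega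
        simp [heq]
    rw [hfil, scanA_append]
    cases hsc : scanA K (Sp N t) cnt with
    | inr j => simp [toOptA]
    | inl c =>
      simp only
      have hSin : ∀ j ∈ Sp N t, 0 ≤ j ∧ j.toNat < v.size := by
        intro j hj
        rw [mem_Sp] at hj
        refine ⟨by omega, ?_⟩
        rw [hInv.1]
        omega
      apply ih (t + 1) (markAll v (Sp N t)) c (by omega) (by omega) (by omega)
      constructor
      · rw [markAll_size, hInv.1]
      · intro j hj0 hjN
        rw [markAll_getD (Sp N t) v hSin j hj0]
        by_cases hmem : j ∈ Sp N t
        · rw [if_pos hmem]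
          rw [mem_Sp] at hmem
          rw [if_pos ⟨hmem.1, by omega⟩]
        · rw [if_neg hmem, hInv.2 j hj0 hjN]
          rw [mem_Sp] at hmem
          by_cases hold : 2 ≤ j ∧ spfI j < t
          · rw [if_pos hold, if_pos ⟨hold.1, by omega⟩]
          · rw [if_neg hold, if_neg (by
              intro hh
              rcases lt_or_eq_of_le (by omega : spfI j ≤ t) with hc | hc
              · exact hold ⟨hh.1, hc⟩
              · exact hmem ⟨hh.1, hjN, hc⟩)]

theorem eratosA_eq (N K : Int) (hN : 1 ≤ N) :
    eratos N K = toOptA (scanA K (corder N) 0) := by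
  unfold eratos corder
  apply outerA_spec N K (N + 1 - 2).toNat 2 _ 0 rfl le_rfl (by omega)
  constructor
  · simp
  · intro j hj0 hjN
    rw [pyArrGet_replicate (N + 1).toNat 0 0 j hj0 (by omega)]
    rw [if_neg (by
      intro hh
      have := spfI_two_le hh.1
      omega)]

-- ---- B side ----

theorem sieve_inner (i : Int) : ∀ (js : List Int) (v : Array Int),
    js.Nodup → (∀ j ∈ js, 0 ≤ j ∧ j.toNat < v.size ∧ j ≠ i) →
    (js.foldl (fun s j => if pyArrGet s j 0 = j then pyArrSet s j i else s) v).size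
        = v.size ∧
    ∀ m : Int, 0 ≤ m →
      pyArrGet
          (js.foldl (fun s j => if pyArrGet s j 0 = j then pyArrSet s j i else s) v) m 0
        = if m ∈ js ∧ pyArrGet v m 0 = m then i else pyArrGet v m 0 := by
  intro js
  induction js with
  | nil =>
    intro v _ _
    refine ⟨rfl, ?_⟩
    intro m _
    simp
  | cons j js ih =>
    intro v hnd hin
    obtain ⟨hj0, hjlen, hji⟩ := hin j (List.mem_cons_self)
    have hjns : j ∉ js := (List.nodup_cons.mp hnd).1
    simp only [List.foldl_cons]
    by_cases hb : pyArrGet v j 0 = j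
    · rw [if_pos hb]
      obtain ⟨ihl, ihg⟩ := ih (pyArrSet v j i) (List.nodup_cons.mp hnd).2
        (fun x hx => by
          rw [pyArrSet_size]
          exact hin x (List.mem_cons_of_mem _ hx))
      refine ⟨by rw [ihl, pyArrSet_size], ?_⟩
      intro m hm0
      rw [ihg m hm0]
      have hget : pyArrGet (pyArrSet v j i) m 0
          = if m.toNat = j.toNat then i else pyArrGet v m 0 := pyArrGet_set v j m i 0 hjlen
      by_cases hmj : m = j
      · subst hmj
        rw [if_neg (fun hh => hjns hh.1), hget, if_pos rfl,
          if_pos ⟨List.mem_cons_self, hb⟩]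
      · have hmj' : m.toNat ≠ j.toNat := by omega
        rw [hget, if_neg hmj']
        have hmem : m ∈ j :: js ↔ m ∈ js := by simp [hmj]
        by_cases hc : m ∈ js ∧ pyArrGet v m 0 = m
        · rw [if_pos hc, if_pos ⟨hmem.mpr hc.1, hc.2⟩]
        · rw [if_neg hc, if_neg (fun hh => hc ⟨hmem.mp hh.1, hh.2⟩)]
    · rw [if_neg hb]
      obtain ⟨ihl, ihg⟩ := ih v (List.nodup_cons.mp hnd).2
        (fun x hx => hin x (List.mem_cons_of_mem _ hx))
      refine ⟨ihl, ?_⟩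
      intro m hm0
      rw [ihg m hm0]
      by_cases hmj : m = j
      · subst hmj
        rw [if_neg (fun hh => hjns hh.1), if_neg (fun hh => hb hh.2)]
      · have hmem : m ∈ j :: js ↔ m ∈ js := by simp [hmj]
        by_cases hc : m ∈ js ∧ pyArrGet v m 0 = m
        · rw [if_pos hc, if_pos ⟨hmem.mpr hc.1, hc.2⟩]
        · rw [if_neg hc, if_neg (fun hh => hc ⟨hmem.mp hh.1, hh.2⟩)]

theorem sieve_spec (N : Int) (hN : 1 ≤ N) :
    ((PySem.List.pyRange 2 (N + 1) 1).foldl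
      (fun spf i =>
        if pyArrGet spf i 0 = i then
          (PySem.List.pyRange (i * i) (N + 1) i).foldl
            (fun s j => if pyArrGet s j 0 = j then pyArrSet s j i else s) spf
        else spf)
      (PySem.List.pyRange 0 (N + 1) 1).toArray).size = (N + 1).toNat ∧
    ∀ m : Int, 0 ≤ m → m ≤ N →
      pyArrGet ((PySem.List.pyRange 2 (N + 1) 1).foldl
        (fun spf i =>
          if pyArrGet spf i 0 = i then
            (PySem.List.pyRange (i * i) (N + 1) i).foldl
              (fun s j => if pyArrGet s j 0 = j then pyArrSet s j i else s) spf
          else spf)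
        (PySem.List.pyRange 0 (N + 1) 1).toArray) m 0 = if 2 ≤ m then spfI m else m := by
  have main := foldl_range_inv
    (fun spf i =>
      if pyArrGet spf i 0 = i then
        (PySem.List.pyRange (i * i) (N + 1) i).foldl
          (fun s j => if pyArrGet s j 0 = j then pyArrSet s j i else s) spf
      else spf)
    (fun t s => 2 ≤ t ∧ s.size = (N + 1).toNat ∧
      ∀ m : Int, 0 ≤ m → m ≤ N →
        pyArrGet s m 0 =
          if 2 ≤ m ∧ spfI m * spfI m ≤ m ∧ spfI m < t then spfI m else m)
    (N + 1) ?hstep 2 (PySem.List.pyRange 0 (N + 1) 1).toArray (by omega) ?hinit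
  case hinit =>
    refine ⟨le_rfl, by simp [PySem.List.length_pyRange_one], ?_⟩
    intro m hm0 hmN
    have hlen : m.toNat < (PySem.List.pyRange 0 (N + 1) 1).length := by
      rw [PySem.List.length_pyRange_one]
      omega
    rw [pyArrGet_toArray, List.getD_eq_getElem _ _ hlen, PySem.List.getElem_pyRange_one]
    rw [if_neg (by
      intro hh
      have := spfI_two_le hh.1
      omega)]
    omega
  case hstep =>
    intro t s hlt hP
    beta_reduce
    obtain ⟨ht2, hlen, hg⟩ := hP
    have htN : t ≤ N := by omega
    have hts : pyArrGet s t 0 =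
        if 2 ≤ t ∧ spfI t * spfI t ≤ t ∧ spfI t < t then spfI t else t := hg t (by omega) htN
    by_cases hp : spfI t = t
    · have htest : pyArrGet s t 0 = t := by
        rw [hts, if_neg (by intro hh; omega)]
      rw [if_pos htest]
      have hnd : (PySem.List.pyRange (t * t) (N + 1) t).Nodup := nodup_pyRange_pos _ _ (by omega)
      have hmemj : ∀ j ∈ PySem.List.pyRange (t * t) (N + 1) t,
          t * t ≤ j ∧ j < N + 1 ∧ t ∣ j := by
        intro j hj
        rw [PySem.List.mem_pyRange_iff_of_pos (by omega)] at hj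
        obtain ⟨h1, h2', h3⟩ := hj
        refine ⟨h1, h2', ?_⟩
        have h' := dvd_add h3 (Dvd.intro t rfl)
        simpa using h'
      obtain ⟨ihl, ihg⟩ := sieve_inner t (PySem.List.pyRange (t * t) (N + 1) t) s hnd
        (fun j hj => by
          obtain ⟨h1, h2', h3⟩ := hmemj j hj
          refine ⟨by nlinarith, by omega, by nlinarith⟩)
      refine ⟨by omega, by rw [ihl, hlen], ?_⟩
      intro m hm0 hmN
      rw [ihg m hm0]
      by_cases c1 : 2 ≤ m ∧ spfI m * spfI m ≤ m ∧ spfI m < t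
      · have hold : pyArrGet s m 0 = spfI m := by rw [hg m hm0 hmN, if_pos c1]
        have hne : spfI m ≠ m := by nlinarith [c1.1, c1.2.1]
        rw [if_neg (by
          intro hh
          rw [hold] at hh
          exact hne hh.2), hold, if_pos ⟨c1.1, c1.2.1, by omega⟩]
      · by_cases c2 : 2 ≤ m ∧ spfI m * spfI m ≤ m ∧ spfI m = t
        · have hold : pyArrGet s m 0 = m := by
            rw [hg m hm0 hmN, if_neg (by intro hh; omega)]
          have hdvd : t ∣ m := c2.2.2 ▸ spfI_dvd (by omega)
          have hmm : m ∈ PySem.List.pyRange (t * t) (N + 1) t := by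
            rw [PySem.List.mem_pyRange_iff_of_pos (by omega)]
            refine ⟨by nlinarith [c2.2.1, c2.2.2], by omega, dvd_sub hdvd (Dvd.intro t rfl)⟩
          rw [if_pos ⟨hmm, hold⟩, if_pos ⟨c2.1, c2.2.1, by omega⟩, c2.2.2]
        · have hold : pyArrGet s m 0 = m := by
            rw [hg m hm0 hmN, if_neg (by intro hh; exact c1 hh)]
          have hnm : m ∉ PySem.List.pyRange (t * t) (N + 1) t := by
            intro hmm
            obtain ⟨h1, h2', h3⟩ := hmemj m hmm
            have hm2 : (2:Int) ≤ m := by nlinarith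
            have hsle : spfI m ≤ t := spfI_le_of_dvd ht2 h3
            have hs2 : 2 ≤ spfI m := spfI_two_le hm2
            have hsq : spfI m * spfI m ≤ m := by nlinarith
            rcases lt_or_eq_of_le hsle with hc | hc
            · exact c1 ⟨hm2, hsq, hc⟩
            · exact c2 ⟨hm2, hsq, hc⟩
          rw [if_neg (fun hh => hnm hh.1), hold,
            if_neg (by
              intro hh
              have hle2 : spfI m ≤ t := by omega
              rcases lt_or_eq_of_le hle2 with hc | hc
              · exact c1 ⟨hh.1, hh.2.1, hc⟩
              · exact c2 ⟨hh.1, hh.2.1, hc⟩)]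
    · have hsl : spfI t ≤ t := spfI_le_self ht2
      have hlt' : spfI t < t := by omega
      have htest : pyArrGet s t 0 = spfI t := by
        rw [hts, if_pos ⟨ht2, spfI_sq_le ht2 hlt', hlt'⟩]
      rw [if_neg (by rw [htest]; omega)]
      refine ⟨by omega, hlen, ?_⟩
      intro m hm0 hmN
      rw [hg m hm0 hmN]
      by_cases c1 : 2 ≤ m ∧ spfI m * spfI m ≤ m ∧ spfI m < t
      · rw [if_pos c1, if_pos ⟨c1.1, c1.2.1, by omega⟩]
      · rw [if_neg c1, if_neg (by
          intro hh
          rcases lt_or_eq_of_le (show spfI m ≤ t by omega) with hc | hc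
          · exact c1 ⟨hh.1, hh.2.1, hc⟩
          · have := spfI_spfI hh.1
            rw [hc] at this
            exact hp this)]
  refine ⟨main.2.1, fun m hm0 hmN => ?_⟩
  rw [main.2.2 m hm0 hmN]
  by_cases h2 : 2 ≤ m
  · by_cases hsq : spfI m * spfI m ≤ m
    · rw [if_pos ⟨h2, hsq, by have := spfI_le_self h2; omega⟩, if_pos h2]
    · rw [if_neg (fun hh => hsq hh.2.1), if_pos h2, spfI_eq_self_of_sq_gt h2 (by omega)]
  · rw [if_neg (fun hh => h2 hh.1), if_neg h2]

theorem Sp_small_nil (N p : Int) (hp : p < 2) : Sp N p = [] := by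
  rw [Sp, List.filter_eq_nil_iff]
  intro m hm
  rw [PySem.List.mem_pyRange_one] at hm
  have := spfI_two_le (by omega : (2:Int) ≤ m)
  simp only [decide_eq_true_eq]
  omega

theorem buckets_flatten (N : Int) (hN : 1 ≤ N) :
    ((PySem.List.pyRange 2 (N + 1) 1).foldl
      (fun bs m =>
        pyArrSet bs (pyArrGet ((PySem.List.pyRange 2 (N + 1) 1).foldl
      (fun spf i =>
        if pyArrGet spf i 0 = i then
          (PySem.List.pyRange (i * i) (N + 1) i).foldl
            (fun s j => if pyArrGet s j 0 = j then pyArrSet s j i else s) spf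
        else spf)
      (PySem.List.pyRange 0 (N + 1) 1).toArray) m 0)
          (pyArrGet bs (pyArrGet ((PySem.List.pyRange 2 (N + 1) 1).foldl
      (fun spf i =>
        if pyArrGet spf i 0 = i then
          (PySem.List.pyRange (i * i) (N + 1) i).foldl
            (fun s j => if pyArrGet s j 0 = j then pyArrSet s j i else s) spf
        else spf)
      (PySem.List.pyRange 0 (N + 1) 1).toArray) m 0) [] ++ [m]))
      (Array.replicate (N + 1).toNat ([] : List Int))).toList.flatten = corder N := by
  obtain ⟨hsl, hsg⟩ := sieve_spec N hN
  have main := foldl_range_inv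
    (fun bs m =>
      pyArrSet bs (pyArrGet ((PySem.List.pyRange 2 (N + 1) 1).foldl
      (fun spf i =>
        if pyArrGet spf i 0 = i then
          (PySem.List.pyRange (i * i) (N + 1) i).foldl
            (fun s j => if pyArrGet s j 0 = j then pyArrSet s j i else s) spf
        else spf)
      (PySem.List.pyRange 0 (N + 1) 1).toArray) m 0)
        (pyArrGet bs (pyArrGet ((PySem.List.pyRange 2 (N + 1) 1).foldl
      (fun spf i =>
        if pyArrGet spf i 0 = i then
          (PySem.List.pyRange (i * i) (N + 1) i).foldl
            (fun s j => if pyArrGet s j 0 = j then pyArrSet s j i else s) spf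
        else spf)
      (PySem.List.pyRange 0 (N + 1) 1).toArray) m 0) [] ++ [m]))
    (fun t bs => 2 ≤ t ∧ bs.size = (N + 1).toNat ∧
      ∀ p : Int, 0 ≤ p → p ≤ N →
        pyArrGet bs p [] = (PySem.List.pyRange 2 t 1).filter (fun x => decide (spfI x = p)))
    (N + 1) ?hstep 2 (Array.replicate (N + 1).toNat ([] : List Int)) (by omega) ?hinit
  case hinit =>
    refine ⟨le_rfl, by simp, ?_⟩
    intro p hp0 hpN
    rw [PySem.List.pyRange_one_eq_nil le_rfl, List.filter_nil]
    rw [pyArrGet_replicate (N + 1).toNat [] [] p hp0 (by omega)]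
  case hstep =>
    intro t bs hlt hP
    beta_reduce
    obtain ⟨ht2, hlen, hg⟩ := hP
    have hspft : pyArrGet ((PySem.List.pyRange 2 (N + 1) 1).foldl
      (fun spf i =>
        if pyArrGet spf i 0 = i then
          (PySem.List.pyRange (i * i) (N + 1) i).foldl
            (fun s j => if pyArrGet s j 0 = j then pyArrSet s j i else s) spf
        else spf)
      (PySem.List.pyRange 0 (N + 1) 1).toArray) t 0 = spfI t := by
      rw [hsg t (by omega) (by omega), if_pos ht2]
    rw [hspft]
    have hs2 : 2 ≤ spfI t := spfI_two_le ht2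
    have hsle : spfI t ≤ t := spfI_le_self ht2
    have hidx : (spfI t).toNat < bs.size := by
      rw [hlen]
      omega
    refine ⟨by omega, by rw [pyArrSet_size, hlen], ?_⟩
    intro p hp0 hpN
    have hget : pyArrGet
        (pyArrSet bs (spfI t) (pyArrGet bs (spfI t) [] ++ [t])) p []
        = if p.toNat = (spfI t).toNat then pyArrGet bs (spfI t) [] ++ [t]
          else pyArrGet bs p [] := by
      exact pyArrGet_set bs (spfI t) p _ [] hidx
    rw [hget, PySem.List.pyRange_one_succ_right ht2, List.filter_append, List.filter_singleton]
    by_cases hpe : p = spfI t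
    · rw [if_pos (by omega), hg (spfI t) (by omega) (by omega), hpe]
      simp
    · rw [if_neg (by omega), hg p hp0 hpN]
      simp [show spfI t ≠ p from fun h => hpe h.symm]
  have hbs : ∀ L : Array (List Int), L.size = (N + 1).toNat →
      (∀ p : Int, 0 ≤ p → p ≤ N →
        pyArrGet L p [] = (PySem.List.pyRange 2 (N + 1) 1).filter (fun x => decide (spfI x = p))) →
      L.toList = (PySem.List.pyRange 0 (N + 1) 1).map (fun p => Sp N p) := by
    intro L hLlen hLget
    apply List.ext_getElem
    · rw [Array.length_toList, hLlen, List.length_map, PySem.List.length_pyRange_one]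
      omega
    · intro k hk1 hk2
      rw [Array.length_toList] at hk1
      have hkN : (k : Int) ≤ N := by
        rw [hLlen] at hk1
        omega
      have hget := hLget (k : Int) (Int.natCast_nonneg k) hkN
      rw [pyArrGet_eq_getElem L k [] hk1] at hget
      rw [Array.getElem_toList, hget, List.getElem_map, PySem.List.getElem_pyRange_one]
      rw [show (0 : Int) + (k : Int) = (k : Int) from by ring]
      rfl
  rw [hbs _ main.2.1 main.2.2]
  rw [show PySem.List.pyRange 0 (N + 1) 1 = 0 :: 1 :: PySem.List.pyRange 2 (N + 1) 1 from by
    rw [PySem.List.pyRange_one_cons (by omega), PySem.List.pyRange_one_cons (by omega)]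
    norm_num]
  simp only [List.map_cons, List.flatten_cons]
  rw [Sp_small_nil N 0 (by omega), Sp_small_nil N 1 (by omega)]
  simp [corder]

theorem eratosB_eq (N K : Int) (hN : 1 ≤ N) (hg : ¬(K < 1 ∨ N - 1 < K)) :
    eratos_alt N K = PySem.List.pyGet? (corder N) (K - 1) := by
  have h := buckets_flatten N hN
  unfold eratos_alt
  rw [if_neg hg]
  simp only [h]

-- ---- length of the crossing order ----

theorem flatten_filter_perm (key : Int → Int) : ∀ (ps xs : List Int), ps.Nodup →
    (∀ x ∈ xs, key x ∈ ps) →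
    ((ps.map (fun p => xs.filter (fun x => decide (key x = p)))).flatten).Perm xs := by
  intro ps
  induction ps with
  | nil =>
    intro xs _ hk
    have hxs : xs = [] := by
      cases xs with
      | nil => rfl
      | cons y ys => exact absurd (hk y List.mem_cons_self) (by simp)
    subst hxs
    simp
  | cons p ps ih =>
    intro xs hnd hk
    have hpns : p ∉ ps := (List.nodup_cons.mp hnd).1
    simp only [List.map_cons, List.flatten_cons]
    have hmap : ps.map (fun q => xs.filter (fun x => decide (key x = q)))
        = ps.map (fun q => (xs.filter (fun x => !decide (key x = p))).filter
            (fun x => decide (key x = q))) := by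
      apply List.map_congr_left
      intro q hq
      rw [List.filter_filter]
      apply List.filter_congr
      intro x _
      by_cases hx : key x = q
      · simp only [hx, decide_true, Bool.true_and]
        have hqp : ¬(q = p) := fun he => hpns (he ▸ hq)
        simp [hqp]
      · simp [hx]
    rw [hmap]
    have hperm := ih (xs.filter (fun x => !decide (key x = p))) (List.nodup_cons.mp hnd).2
      (fun x hx => by
        have hxm := List.mem_of_mem_filter hx
        have hxp : ¬(key x = p) := by
          have := List.of_mem_filter hx
          simpa using this
        have := hk x hxm
        rw [List.mem_cons] at this
        tauto)
    exact (hperm.append_left _).trans (List.filter_append_perm _ xs)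

theorem length_corder (N : Int) (hN : 1 ≤ N) : ((corder N).length : Int) = N - 1 := by
  have hperm := flatten_filter_perm spfI (PySem.List.pyRange 2 (N + 1) 1)
    (PySem.List.pyRange 2 (N + 1) 1) (PySem.List.nodup_pyRange_one 2 (N + 1))
    (fun x hx => by
      rw [PySem.List.mem_pyRange_one] at hx ⊢
      have h2 := spfI_two_le hx.1
      have hle := spfI_le_self hx.1
      omega)
  have hlen := hperm.length_eq
  rw [PySem.List.length_pyRange_one] at hlen
  unfold corder Sp
  rw [hlen]
  omega

-- ===== VERDICT (by name: the statement is the Claim_ definition above) =====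
theorem eratos_spec : Claim_equal_eratos := by
  intro N K _
  unfold Spec_eratos
  by_cases hN : N ≤ 0
  · have hA : eratos N K = none := by
      unfold eratos
      rw [PySem.List.pyRange_one_eq_nil (by omega)]
      rfl
    have hB : eratos_alt N K = none := by
      unfold eratos_alt
      rw [if_pos (by omega)]
    rw [hA, hB]
  · have hN1 : 1 ≤ N := by omega
    rw [eratosA_eq N K hN1]
    have hlen := length_corder N hN1
    by_cases hg : K < 1 ∨ N - 1 < K
    · have hB : eratos_alt N K = none := by
        unfold eratos_alt
        rw [if_pos hg]
      rw [hB, scanA_spec, if_neg (by omega)]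
      rfl
    · rw [eratosB_eq N K hN1 hg, scanA_spec, if_pos (by omega)]
      have hkl : (K - 1).toNat < (corder N).length := by omega
      rw [PySem.List.pyGet?_of_nonneg _ (by omega : (0:Int) ≤ K - 1),
        List.getElem?_eq_getElem hkl]
      show some ((corder N).getD (K - 1 - 0).toNat 0) = _
      rw [show K - 1 - 0 = K - 1 from by ring, List.getD_eq_getElem _ _ hkl]
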